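-- pv_equiv track=rewrite | github.com/skthati/Python-Algorithms | Basic/function compare x and o to return true or false.py | compare_sentence
-- ===== SOURCE A (Python) =====
-- def compare_sentence(sentence):
--     x_count = 0
--     o_count = 0
--
--     for i in sentence:
--         x_count = sentence.count("x")
--
--     for j in sentence:
--         o_count = sentence.count("o")
--
--     if x_count == o_count:
--         return True
--     else:
--         return False
-- ===== SOURCE B (Python) =====
-- def compare_sentence(sentence):
--     balance = 0
--     for ch in sentence:
--         if ch == "x":
--             balance += 1
--         elif ch == "o":
--             balance -= 1
--     return balance == 0
-- ===== Notes on version B (the rewrite author's own statement) =====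
-- stated objective: faster
-- what changed: B makes a single pass maintaining one running balance (incremented on the first target character, decremented on the second) and tests it for zero, instead of A's redundant loops that recompute both full substring counts once per character.
import Mathlib
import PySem

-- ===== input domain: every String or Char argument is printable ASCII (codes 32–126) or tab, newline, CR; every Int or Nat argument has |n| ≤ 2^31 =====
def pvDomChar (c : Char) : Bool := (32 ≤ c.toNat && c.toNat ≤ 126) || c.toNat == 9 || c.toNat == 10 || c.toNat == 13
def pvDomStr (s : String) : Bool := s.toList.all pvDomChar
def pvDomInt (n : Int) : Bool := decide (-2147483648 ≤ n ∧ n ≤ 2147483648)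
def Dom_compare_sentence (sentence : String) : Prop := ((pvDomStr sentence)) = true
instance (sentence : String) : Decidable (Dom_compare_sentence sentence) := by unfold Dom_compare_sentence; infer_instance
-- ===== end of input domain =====

-- B replaces A's per-character recomputation of both substring counts by one pass over a single
-- running x-minus-o balance (objective: faster).

-- ===== PORT A =====
def compare_sentence (sentence : String) : Bool :=
  let x_count : Int := 0
  let o_count : Int := 0
  let x_count := sentence.toList.foldl (fun _ _ => (PySem.Str.count sentence "x" : Int)) x_count
  let o_count := sentence.toList.foldl (fun _ _ => (PySem.Str.count sentence "o" : Int)) o_count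
  if x_count == o_count then true else false

-- ===== PORT B =====
def compare_sentence_alt (sentence : String) : Bool :=
  let balance := sentence.toList.foldl
    (fun b c => if c == 'x' then b + 1 else if c == 'o' then b - 1 else b) (0 : Int)
  balance == 0

-- ===== PRECONDITION & SPEC =====
def Spec_compare_sentence (sentence : String) (out : Bool) : Prop := out = compare_sentence_alt sentence
instance (sentence : String) (out : Bool) : Decidable (Spec_compare_sentence sentence out) := by unfold Spec_compare_sentence; infer_instance

-- ===== CLAIM (what is proved, stated in full; the proofs are below) =====
def Claim_equal_compare_sentence : Prop := ∀ (sentence : String), Dom_compare_sentence sentence → Spec_compare_sentence sentence (compare_sentence sentence)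

-- ===== LEMMAS AND PROOFS =====

-- a fold with a constant-valued body returns the constant on a nonempty list
theorem foldl_const_of_ne_nil {α β : Type} (v : β) (a : β) :
    ∀ (l : List α), l ≠ [] → l.foldl (fun _ _ => v) a = v := by
  intro l h
  cases l with
  | nil => exact absurd rfl h
  | cons c t =>
    clear h
    induction t generalizing a c with
    | nil => rfl
    | cons d t ih => exact ih v d

-- count.go on a singleton pattern, with enough fuel, counts character occurrences
theorem count_go_singleton (c : Char) :
    ∀ (l : List Char) (fuel acc : Nat), l.length ≤ fuel →
      PySem.Chars.count.go [c] fuel l acc = acc + l.count c := by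
  intro l
  induction l with
  | nil =>
    intro fuel acc _
    cases fuel <;> simp [PySem.Chars.count.go]
  | cons d t ih =>
    intro fuel acc hle
    cases fuel with
    | zero => simp at hle
    | succ n =>
      simp only [List.length_cons, Nat.add_one_le_iff, Nat.lt_succ_iff] at hle
      by_cases hdc : d = c
      · subst hdc
        have hpre : List.isPrefixOf [d] (d :: t) = true := by
          simp [List.isPrefixOf]
        simp only [PySem.Chars.count.go, hpre, if_pos]
        rw [show List.drop (List.length [d]) (d :: t) = t by simp]
        rw [ih n (acc + 1) hle]
        simp
        omega
      · have hpre : List.isPrefixOf [c] (d :: t) = false := by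
          simp [List.isPrefixOf]
          exact fun h => absurd h.symm hdc
        simp only [PySem.Chars.count.go, hpre]
        rw [ih n acc hle]
        simp [hdc]

theorem chars_count_singleton (c : Char) (l : List Char) :
    PySem.Chars.count l [c] = l.count c := by
  unfold PySem.Chars.count
  simp only [List.isEmpty_iff]
  have : ¬ ([c] = ([] : List Char)) := by simp
  rw [if_neg this]
  rw [count_go_singleton c l l.length 0 le_rfl]; omega

-- the balance fold computes (count 'x') - (count 'o')
theorem balance_fold (l : List Char) :
    ∀ (a : Int), l.foldl
      (fun b c => if c == 'x' then b + 1 else if c == 'o' then b - 1 else b) a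
      = a + (l.count 'x' : Int) - (l.count 'o' : Int) := by
  induction l with
  | nil => intro a; simp
  | cons d t ih =>
    intro a
    simp only [List.foldl_cons]
    by_cases hx : d = 'x'
    · subst hx
      rw [if_pos (by simp), ih]
      simp
      omega
    · by_cases ho : d = 'o'
      · subst ho
        rw [if_neg (by simp), if_pos (by simp), ih]
        simp
        omega
      · rw [if_neg (by simp [hx]), if_neg (by simp [ho]), ih]
        simp [hx, ho]

-- ===== VERDICT (by name: the statement is the Claim_ definition above) =====
theorem compare_sentence_spec : Claim_equal_compare_sentence := by
  intro s _
  unfold Spec_compare_sentence compare_sentence compare_sentence_alt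
  simp only
  rw [balance_fold]
  have hx : PySem.Str.count s "x" = s.toList.count 'x' := by
    rw [PySem.Str.count_eq]; exact chars_count_singleton 'x' s.toList
  have ho : PySem.Str.count s "o" = s.toList.count 'o' := by
    rw [PySem.Str.count_eq]; exact chars_count_singleton 'o' s.toList
  rcases eq_or_ne s.toList [] with h | h
  · simp [h]
  · rw [foldl_const_of_ne_nil _ _ _ h, foldl_const_of_ne_nil _ _ _ h, hx, ho]
    simp only [beq_iff_eq, Nat.cast_inj, zero_add]
    by_cases hco : s.toList.count 'x' = s.toList.count 'o'
    · simp [hco]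
    · simp only [hco, if_false]
      symm
      simp only [beq_eq_false_iff_ne, ne_eq]
      omega
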